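-- pv_equiv track=rewrite | github.com/OllieOA/advent_of_code_2021 | day07/day07.py | calc_fuel_linear
-- ===== SOURCE A (Python) =====
-- def calc_fuel_linear(initial_pos, desired_spot):
--     pos_count = dict()
--     for i in initial_pos:
--         pos_count[i] = pos_count.get(i, 0) + 1
--
--     fuel_spent = 0
--     for key, val in pos_count.items():
--         dist = abs(key - desired_spot)
--         linear_cost = (dist * (dist + 1)) // 2
--         fuel_spent += linear_cost * val
--
--     return fuel_spent
-- ===== SOURCE B (Python) =====
-- def calc_fuel_linear(initial_pos, desired_spot):
--     # Simpler: single pass over the crabs, no frequency table.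
--     total = 0
--     for p in initial_pos:
--         dist = abs(p - desired_spot)
--         total += dist * (dist + 1) // 2
--     return total
-- ===== Notes on version B (the rewrite author's own statement) =====
-- stated objective: simpler
-- what changed: Dropped the frequency dict: B makes one direct pass over initial_pos accumulating dist*(dist+1)//2 per crab, instead of building a count table and then summing cost*count over its items.
import Mathlib
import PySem

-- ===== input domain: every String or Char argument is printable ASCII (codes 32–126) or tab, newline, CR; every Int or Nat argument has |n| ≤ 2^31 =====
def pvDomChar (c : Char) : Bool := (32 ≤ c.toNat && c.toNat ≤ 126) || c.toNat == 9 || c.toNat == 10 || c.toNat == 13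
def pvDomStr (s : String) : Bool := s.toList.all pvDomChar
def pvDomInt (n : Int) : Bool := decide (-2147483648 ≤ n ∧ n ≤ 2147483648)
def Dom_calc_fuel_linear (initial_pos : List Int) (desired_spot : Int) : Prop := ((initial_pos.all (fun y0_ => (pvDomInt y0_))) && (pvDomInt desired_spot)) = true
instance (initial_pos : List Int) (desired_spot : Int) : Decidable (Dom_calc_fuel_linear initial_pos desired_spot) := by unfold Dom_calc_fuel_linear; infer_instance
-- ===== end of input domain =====

-- B replaces A's frequency-dict-then-sum-over-items with a single direct pass over
-- initial_pos accumulating the triangular cost per crab (objective: simpler).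


-- ===== PORT A =====
def calc_fuel_linear (initial_pos : List Int) (desired_spot : Int) : Int :=
  let pos_count : PySem.Dict Int Int :=
    initial_pos.foldl (fun d i => d.insert i (d.getD i 0 + 1)) PySem.Dict.empty
  pos_count.items.foldl (fun fuel_spent kv =>
    let dist := |kv.1 - desired_spot|
    let linear_cost := PySem.Int.floordiv (dist * (dist + 1)) 2
    fuel_spent + linear_cost * kv.2) 0

-- ===== PORT B =====
def calc_fuel_linear_alt (initial_pos : List Int) (desired_spot : Int) : Int :=
  initial_pos.foldl (fun total p =>
    let dist := |p - desired_spot|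
    total + PySem.Int.floordiv (dist * (dist + 1)) 2) 0

-- ===== PRECONDITION & SPEC =====
def Spec_calc_fuel_linear (initial_pos : List Int) (desired_spot : Int) (out : Int) : Prop := out = calc_fuel_linear_alt initial_pos desired_spot
instance (initial_pos : List Int) (desired_spot : Int) (out : Int) : Decidable (Spec_calc_fuel_linear initial_pos desired_spot out) := by unfold Spec_calc_fuel_linear; infer_instance

-- ===== CLAIM (what is proved, stated in full; the proofs are below) =====
def Claim_equal_calc_fuel_linear : Prop := ∀ (initial_pos : List Int) (desired_spot : Int), Dom_calc_fuel_linear initial_pos desired_spot → Spec_calc_fuel_linear initial_pos desired_spot (calc_fuel_linear initial_pos desired_spot)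

-- ===== LEMMAS AND PROOFS =====

-- ∑_{k ∈ ks} f k * [k = x] = f x when ks is duplicate-free and contains x.
theorem pv_sum_indicator (f : Int → Int) (ks : List Int) (x : Int)
    (hnd : ks.Nodup) (hx : x ∈ ks) :
    (ks.map (fun k => f k * (if x = k then (1 : Int) else 0))).sum = f x := by
  induction ks with
  | nil => cases hx
  | cons a ks ih =>
    by_cases hxa : x = a
    · subst hxa
      have hnotin : x ∉ ks := (List.nodup_cons.mp hnd).1
      have hz : (ks.map (fun k => f k * (if x = k then (1 : Int) else 0))).sum = 0 := by
        apply List.sum_eq_zero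
        intro y hy
        rcases List.mem_map.mp hy with ⟨k, hk, rfl⟩
        have hne : x ≠ k := fun h => hnotin (h ▸ hk)
        simp [hne]
      rw [List.map_cons, List.sum_cons, if_pos rfl, mul_one, hz, add_zero]
    · have hxm : x ∈ ks := by
        rcases List.mem_cons.mp hx with h | h
        · exact absurd h hxa
        · exact h
      rw [List.map_cons, List.sum_cons, if_neg hxa, mul_zero, zero_add,
        ih (List.nodup_cons.mp hnd).2 hxm]

-- The weighted sum of f over the distinct elements (weights = multiplicities)
-- equals the plain sum of f over the list.
theorem pv_sum_counts (f : Int → Int) (xs : List Int) :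
    ((PySem.Set.ofList xs).map (fun k => f k * (xs.count k : Int))).sum
      = (xs.map f).sum := by
  -- generalize the distinct key list
  suffices h : ∀ (ks : List Int), ks.Nodup → (∀ x ∈ xs, x ∈ ks) →
      (ks.map (fun k => f k * (xs.count k : Int))).sum = (xs.map f).sum by
    have := h (PySem.Set.ofList xs) (PySem.Set.nodup_ofList xs)
      (fun x hx => (PySem.Set.mem_ofList xs x).mpr hx)
    simpa using this
  intro ks
  induction xs with
  | nil => intro _ _; simp
  | cons x xs ih =>
    intro hnd hmem
    have hx : x ∈ ks := hmem x (List.mem_cons_self ..)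
    have hcnt : ∀ k : Int, (((x :: xs).count k : Int))
        = (xs.count k : Int) + (if x = k then (1 : Int) else 0) := by
      intro k
      by_cases h : x = k <;> simp [h]
    calc (ks.map (fun k => f k * ((x :: xs).count k : Int))).sum
        = (ks.map (fun k => f k * (xs.count k : Int)
            + f k * (if x = k then (1 : Int) else 0))).sum := by
          congr 1; apply List.map_congr_left; intro k _
          rw [hcnt k, mul_add]
      _ = (ks.map (fun k => f k * (xs.count k : Int))).sum
            + (ks.map (fun k => f k * (if x = k then (1 : Int) else 0))).sum :=
          PySem.List.sum_map_add_int ks _ _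
      _ = (xs.map f).sum + f x := by
          rw [ih hnd (fun y hy => hmem y (List.mem_cons_of_mem _ hy)),
            pv_sum_indicator f ks x hnd hx]
      _ = ((x :: xs).map f).sum := by simp [add_comm]

-- ===== VERDICT (by name: the statement is the Claim_ definition above) =====
theorem calc_fuel_linear_spec : Claim_equal_calc_fuel_linear := by
  intro initial_pos desired_spot _
  unfold Spec_calc_fuel_linear calc_fuel_linear calc_fuel_linear_alt
  rw [PySem.Dict.foldl_insert_getD_add_one_eq_counter,
    PySem.List.foldl_add, PySem.List.foldl_add,
    PySem.Dict.items_counter, List.map_map]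
  simp only [zero_add]
  exact pv_sum_counts
    (fun k => PySem.Int.floordiv (|k - desired_spot| * (|k - desired_spot| + 1)) 2)
    initial_pos
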